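-- pv_equiv track=rewrite | github.com/A-Korotin/algorithms_and_data_structures | 2 semester/lab4/lab4_6d.py | find_cyclic_shift
-- ===== SOURCE A (Python) =====
-- def find_cyclic_shift(s1, s2):
--     if len(s1) != len(s2):
--         return -1
--     if s1 == s2:
--         return 0
--
--     res = 0
--
--     for i in range(len(s1)):
--         shift = s1[len(s1) - i - 1:len(s1)] + s1[0:len(s1) - i - 1]
--         if shift == s2:
--             res += 1
--             break
--         res += 1
--     if res == len(s1):
--         res = -1
--
--     return res
-- ===== SOURCE B (Python) =====
-- def find_cyclic_shift(s1, s2):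
--     # Search the reversed pattern in the doubled reversed string: one fast
--     # C-level str.find instead of building every rotation.
--     n = len(s1)
--     if n != len(s2):
--         return -1
--     if s1 == s2:
--         return 0
--     r1 = s1[::-1]
--     return (r1 + r1).find(s2[::-1], 1)
-- ===== Notes on version B (the rewrite author's own statement) =====
-- stated objective: faster
-- what changed: Instead of building and comparing every rotation of s1 (a slice-and-concatenate loop), B reverses both strings and locates the reversed s2 in the doubled reversed s1 with a single str.find, whose index is exactly A's answer.
import Mathlib
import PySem

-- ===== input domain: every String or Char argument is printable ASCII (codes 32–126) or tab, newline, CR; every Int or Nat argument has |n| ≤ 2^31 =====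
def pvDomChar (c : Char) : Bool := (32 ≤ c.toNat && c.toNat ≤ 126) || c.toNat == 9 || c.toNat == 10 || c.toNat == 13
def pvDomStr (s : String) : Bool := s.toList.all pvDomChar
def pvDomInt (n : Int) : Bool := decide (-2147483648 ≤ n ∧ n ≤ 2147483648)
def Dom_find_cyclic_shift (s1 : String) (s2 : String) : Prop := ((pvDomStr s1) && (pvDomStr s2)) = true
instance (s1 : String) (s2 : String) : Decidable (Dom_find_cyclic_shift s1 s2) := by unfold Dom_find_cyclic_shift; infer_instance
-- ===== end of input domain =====

-- B replaces A's rotation-building loop by one substring search of the reversed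
-- pattern in the doubled reversed string (objective: faster).

-- ===== PORT A =====
-- the for-loop of A: i counts up, res accumulates, break on the first matching rotation
def pvGoA (s1 s2 : List Char) (n i res : Nat) : Nat :=
  if _h : i < n then
    -- shift = s1[len(s1)-i-1 : len(s1)] + s1[0 : len(s1)-i-1]
    let shift := PySem.List.slice s1 (some ((n : Int) - (i : Int) - 1)) (some (n : Int)) ++
                 PySem.List.slice s1 (some 0) (some ((n : Int) - (i : Int) - 1))
    if shift = s2 then res + 1
    else pvGoA s1 s2 n (i + 1) (res + 1)
  else res
termination_by n - i

def find_cyclic_shift (s1 : String) (s2 : String) : Int :=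
  if s1.toList.length ≠ s2.toList.length then -1
  else if s1.toList = s2.toList then 0
  else
    let n := s1.toList.length
    let res := pvGoA s1.toList s2.toList n 0 0
    if res = n then -1 else (res : Int)

-- ===== PORT B =====
def find_cyclic_shift_alt (s1 : String) (s2 : String) : Int :=
  if s1.toList.length ≠ s2.toList.length then -1
  else if s1.toList = s2.toList then 0
  else
    -- s[::-1] is List.reverse (exact: PySem.Str.slice?_none_none_neg_one)
    let r1 := s1.toList.reverse
    let r2 := s2.toList.reverse
    -- (r1 + r1).find(r2, 1)
    PySem.Chars.findFrom (r1 ++ r1) r2 1 none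

-- ===== PRECONDITION & SPEC =====
def Spec_find_cyclic_shift (s1 : String) (s2 : String) (out : Int) : Prop := out = find_cyclic_shift_alt s1 s2
instance (s1 : String) (s2 : String) (out : Int) : Decidable (Spec_find_cyclic_shift s1 s2 out) := by unfold Spec_find_cyclic_shift; infer_instance

-- ===== CLAIM (what is proved, stated in full; the proofs are below) =====
def Claim_equal_find_cyclic_shift : Prop := ∀ (s1 : String) (s2 : String), Dom_find_cyclic_shift s1 s2 → Spec_find_cyclic_shift s1 s2 (find_cyclic_shift s1 s2)

-- ===== LEMMAS AND PROOFS =====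

-- A's i-th rotation, in drop/take form
theorem pv_shift_formula (s1 : List Char) (n i : Nat) (hn : s1.length = n) (hi : i < n) :
    PySem.List.slice s1 (some ((n : Int) - (i : Int) - 1)) (some (n : Int)) ++
      PySem.List.slice s1 (some 0) (some ((n : Int) - (i : Int) - 1)) =
    s1.drop (n - 1 - i) ++ s1.take (n - 1 - i) := by
  have ha : (n : Int) - (i : Int) - 1 = ((n - 1 - i : Nat) : Int) := by omega
  rw [ha, show ((n : Int)) = ((n : Nat) : Int) from rfl, PySem.List.slice_natCast,
    PySem.List.slice_zero_start, PySem.List.slice_to_natCast]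
  congr 1
  apply List.take_of_length_le
  simp [hn]

-- the match condition of A's loop at index i equals an occurrence of r2 at offset i+1 in r1++r1
theorem pv_occ_iff (s1 s2 : List Char) (n i : Nat) (hn : s1.length = n) (hm : s2.length = n)
    (hi : i < n) :
    (s1.drop (n - 1 - i) ++ s1.take (n - 1 - i) = s2) ↔
      s2.reverse <+: (s1.reverse ++ s1.reverse).drop (i + 1) := by
  have h1 : (s1.reverse ++ s1.reverse).drop (i + 1) = s1.reverse.drop (i + 1) ++ s1.reverse := by
    refine List.drop_append_of_le_length ?_
    simp [hn]; omega
  rw [h1, List.prefix_iff_eq_take]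
  have hl : s2.reverse.length = n := by simp [hm]
  rw [hl, List.take_append]
  have h2 : (s1.reverse.drop (i + 1)).take n = s1.reverse.drop (i + 1) := by
    apply List.take_of_length_le; simp [hn]
  rw [h2]
  have h3 : n - (s1.reverse.drop (i + 1)).length = i + 1 := by simp [hn]; omega
  rw [h3, List.drop_reverse, List.take_reverse, hn]
  have h4 : n - (i + 1) = n - 1 - i := by omega
  rw [h4, ← List.reverse_append]
  constructor
  · intro h; rw [← h]
  · intro h
    have := congrArg List.reverse h
    simpa using this.symm

-- loop value when no index in [i0, n) matches
theorem pvGoA_none (s1 s2 : List Char) (n : Nat) (i0 res : Nat)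
    (h : ∀ i, i0 ≤ i → i < n →
      PySem.List.slice s1 (some ((n : Int) - (i : Int) - 1)) (some (n : Int)) ++
        PySem.List.slice s1 (some 0) (some ((n : Int) - (i : Int) - 1)) ≠ s2) :
    pvGoA s1 s2 n i0 res = res + (n - i0) := by
  have key : ∀ k i0 res, n - i0 = k → (∀ i, i0 ≤ i → i < n →
      PySem.List.slice s1 (some ((n : Int) - (i : Int) - 1)) (some (n : Int)) ++
        PySem.List.slice s1 (some 0) (some ((n : Int) - (i : Int) - 1)) ≠ s2) →
      pvGoA s1 s2 n i0 res = res + (n - i0) := by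
    intro k
    induction k with
    | zero =>
      intro i0 res hk h
      rw [pvGoA, dif_neg (by omega)]
      omega
    | succ k ih =>
      intro i0 res hk h
      rw [pvGoA, dif_pos (by omega : i0 < n)]
      dsimp only
      rw [if_neg (h i0 le_rfl (by omega))]
      rw [ih (i0 + 1) (res + 1) (by omega) (fun i hi hin => h i (by omega) hin)]
      omega
  exact key (n - i0) i0 res rfl h

-- loop value when m is the first matching index ≥ i0
theorem pvGoA_found (s1 s2 : List Char) (n : Nat) (i0 res m : Nat)
    (him : i0 ≤ m) (hmn : m < n)
    (hm : PySem.List.slice s1 (some ((n : Int) - (m : Int) - 1)) (some (n : Int)) ++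
        PySem.List.slice s1 (some 0) (some ((n : Int) - (m : Int) - 1)) = s2)
    (hmin : ∀ j, i0 ≤ j → j < m →
      PySem.List.slice s1 (some ((n : Int) - (j : Int) - 1)) (some (n : Int)) ++
        PySem.List.slice s1 (some 0) (some ((n : Int) - (j : Int) - 1)) ≠ s2) :
    pvGoA s1 s2 n i0 res = res + (m - i0) + 1 := by
  have key : ∀ k i0 res, m - i0 = k → i0 ≤ m →
      (∀ j, i0 ≤ j → j < m →
        PySem.List.slice s1 (some ((n : Int) - (j : Int) - 1)) (some (n : Int)) ++
          PySem.List.slice s1 (some 0) (some ((n : Int) - (j : Int) - 1)) ≠ s2) →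
      pvGoA s1 s2 n i0 res = res + (m - i0) + 1 := by
    intro k
    induction k with
    | zero =>
      intro i0 res hk him0 _
      have hi0 : i0 = m := by omega
      subst hi0
      rw [pvGoA, dif_pos hmn]
      dsimp only
      rw [if_pos hm]
      omega
    | succ k ih =>
      intro i0 res hk him0 hmin0
      rw [pvGoA, dif_pos (by omega : i0 < n)]
      dsimp only
      rw [if_neg (hmin0 i0 le_rfl (by omega))]
      rw [ih (i0 + 1) (res + 1) (by omega) (by omega) (fun j hj hjm => hmin0 j (by omega) hjm)]
      omega
  exact key (m - i0) i0 res rfl him hmin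

-- ===== VERDICT (by name: the statement is the Claim_ definition above) =====
theorem find_cyclic_shift_spec : Claim_equal_find_cyclic_shift := by
  intro s1 s2 _dom
  unfold Spec_find_cyclic_shift find_cyclic_shift find_cyclic_shift_alt
  by_cases hlen : s1.toList.length ≠ s2.toList.length
  · rw [if_pos hlen, if_pos hlen]
  · rw [if_neg hlen, if_neg hlen]
    by_cases heq : s1.toList = s2.toList
    · rw [if_pos heq, if_pos heq]
    · rw [if_neg heq, if_neg heq]
      -- notation
      have hlen2 : s2.toList.length = s1.toList.length := by omega
      have hn1 : 1 ≤ s1.toList.length := by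
        by_contra h0
        apply heq
        have h1 : s1.toList = [] := by
          cases h1 : s1.toList with
          | nil => rfl
          | cons a l => rw [h1] at h0; simp at h0
        have h2 : s2.toList = [] := by
          cases h2 : s2.toList with
          | nil => rfl
          | cons a l => rw [h1, h2] at hlen2; simp at hlen2
        rw [h1, h2]
      dsimp only
      -- name the pieces
      generalize hL1 : s1.toList = L1 at *
      generalize hL2 : s2.toList = L2 at *
      set n := L1.length with hn
      set u := (L1.reverse ++ L1.reverse).drop 1 with hu
      have hulen : u.length = 2 * n - 1 := by simp [hu]; omega
      -- evaluate B: find(r1+r1, r2, 1)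
      rw [show (1 : Int) = ((1 : Nat) : Int) by simp]
      rw [PySem.Chars.findFrom_natCast _ _ 1 (by simp; omega)]
      rw [← hu]
      have hdrop : ∀ i : Nat, u.drop i = (L1.reverse ++ L1.reverse).drop (i + 1) := by
        intro i; rw [hu, List.drop_drop, Nat.add_comm]
      by_cases hf : PySem.Chars.find u L2.reverse = -1
      · -- no occurrence: A's loop runs to the end
        rw [if_pos hf]
        have hno : ∀ i, 0 ≤ i → i < n →
            PySem.List.slice L1 (some ((n : Int) - (i : Int) - 1)) (some (n : Int)) ++
              PySem.List.slice L1 (some 0) (some ((n : Int) - (i : Int) - 1)) ≠ L2 := by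
          intro i _ hi hmatch
          rw [pv_shift_formula L1 n i hn.symm hi] at hmatch
          have hpre : L2.reverse <+: u.drop i := by
            rw [hdrop]
            exact (pv_occ_iff L1 L2 n i hn.symm (by omega) hi).mp hmatch
          have hisin : PySem.Chars.isIn L2.reverse u = true :=
            (PySem.Chars.exists_prefix_drop_iff_isIn L2.reverse u).mp ⟨i, hpre⟩
          rw [PySem.Chars.find_eq_neg_one_iff] at hf
          rw [PySem.Chars.isIn_iff_infix] at hisin
          exact hf hisin
        rw [pvGoA_none L1 L2 n 0 0 hno]
        simp
      · -- first occurrence at f.toNat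
        rw [if_neg hf]
        have hfge : 0 ≤ PySem.Chars.find u L2.reverse := by
          have := PySem.Chars.neg_one_le_find u L2.reverse
          omega
        obtain ⟨hpre, hmin⟩ := PySem.Chars.find_spec hfge
        set m := (PySem.Chars.find u L2.reverse).toNat with hmdef
        have hmn : m < n := by
          have hle := List.IsPrefix.length_le hpre
          simp [hulen] at hle
          omega
        have hmatch : PySem.List.slice L1 (some ((n : Int) - (m : Int) - 1)) (some (n : Int)) ++
            PySem.List.slice L1 (some 0) (some ((n : Int) - (m : Int) - 1)) = L2 := by
          rw [pv_shift_formula L1 n m hn.symm hmn]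
          refine (pv_occ_iff L1 L2 n m hn.symm (by omega) hmn).mpr ?_
          rw [← hdrop]
          exact hpre
        have hminimal : ∀ j, 0 ≤ j → j < m →
            PySem.List.slice L1 (some ((n : Int) - (j : Int) - 1)) (some (n : Int)) ++
              PySem.List.slice L1 (some 0) (some ((n : Int) - (j : Int) - 1)) ≠ L2 := by
          intro j _ hj habs
          apply hmin j hj
          rw [pv_shift_formula L1 n j hn.symm (by omega)] at habs
          rw [hdrop]
          exact (pv_occ_iff L1 L2 n j hn.symm (by omega) (by omega)).mp habs
        rw [pvGoA_found L1 L2 n 0 0 m (Nat.zero_le m) hmn hmatch hminimal]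
        have hne : ¬ (0 + (m - 0) + 1 = n) := by
          intro habs
          apply heq
          have hm1 : m = n - 1 := by omega
          rw [hm1] at hmatch
          rw [pv_shift_formula L1 n (n - 1) hn.symm (by omega)] at hmatch
          simpa [show n - 1 - (n - 1) = 0 by omega] using hmatch
        rw [if_neg hne]
        have : (PySem.Chars.find u L2.reverse) = (m : Int) := by omega
        rw [this]
        push_cast
        omega
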